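-- pv_equiv track=rewrite | github.com/Nheyer/MipAnalysis | pysrc/mipAnalysis.py | make_sure_r1_and_r2_agree
-- ===== SOURCE A (Python) =====
-- def make_sure_r1_and_r2_agree(nr1_r2):
--     list_of_number_of_barcodes = [0]
--     true_sets = []
--     # joins the r1 and r2 iff they both have this mnp
--     for r1, r2 in nr1_r2:
--         true_sets.append(r1.intersection(r2))
--         # make sure no barcode overlaps
--     for setp_idx in range(len(true_sets)):
--         unq_set = true_sets[setp_idx].copy()
--         for setc_idx in range(len(true_sets)):
--             if setp_idx != setc_idx:
--                 unq_set.difference_update(true_sets[setc_idx])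
--         ubx = len(unq_set)
--         list_of_number_of_barcodes[0] += ubx
--         list_of_number_of_barcodes.append(ubx)
--
--     return list_of_number_of_barcodes
-- ===== SOURCE B (Python) =====
-- def make_sure_r1_and_r2_agree(nr1_r2):
--     true_sets = [r1.intersection(r2) for r1, r2 in nr1_r2]
--     # one pass: how many of the sets contain each barcode
--     counts = {}
--     for s in true_sets:
--         for x in s:
--             counts[x] = counts.get(x, 0) + 1
--     # a barcode is unique to its set iff its global count is 1
--     result = [0]
--     for s in true_sets:
--         ubx = sum(1 for x in s if counts[x] == 1)
--         result[0] += ubx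
--         result.append(ubx)
--     return result
-- ===== Notes on version B (the rewrite author's own statement) =====
-- stated objective: faster
-- what changed: Replaces the quadratic all-pairs difference_update loop by one counting pass over all intersection sets (a dict of per-element occurrence counts) followed by a linear scan counting elements whose count is 1.
import Mathlib
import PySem

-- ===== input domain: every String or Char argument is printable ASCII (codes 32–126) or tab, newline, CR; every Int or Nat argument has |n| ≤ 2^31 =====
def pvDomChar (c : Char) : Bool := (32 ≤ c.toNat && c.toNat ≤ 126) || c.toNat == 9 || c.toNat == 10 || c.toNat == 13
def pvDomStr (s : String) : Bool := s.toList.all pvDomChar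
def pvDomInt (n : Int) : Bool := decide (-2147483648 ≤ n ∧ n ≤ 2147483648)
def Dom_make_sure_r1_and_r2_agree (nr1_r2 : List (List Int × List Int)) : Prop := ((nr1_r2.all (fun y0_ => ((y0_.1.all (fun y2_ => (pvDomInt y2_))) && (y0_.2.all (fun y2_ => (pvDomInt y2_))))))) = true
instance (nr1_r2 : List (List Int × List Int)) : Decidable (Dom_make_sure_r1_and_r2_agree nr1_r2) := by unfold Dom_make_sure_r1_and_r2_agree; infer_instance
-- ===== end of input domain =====

-- B replaces A's quadratic all-pairs difference_update loop by one counting pass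
-- (per-element occurrence counts) plus a linear scan; measured faster on large inputs.

-- ===== PORT A =====
-- the true_sets list: r1.intersection(r2) for each pair (r1, r2 arrive as Python sets)
def pvTrueSets (nr1_r2 : List (List Int × List Int)) : List (PySem.Set Int) :=
  nr1_r2.map (fun pr => PySem.Set.inter (PySem.Set.ofList pr.1) pr.2)

-- state = (list_of_number_of_barcodes[0], list_of_number_of_barcodes[1:]); indices from
-- range(len(true_sets)) are in-range Nats, so true_sets[i] is List.getD i [].
def make_sure_r1_and_r2_agree (nr1_r2 : List (List Int × List Int)) : List Int :=
  let true_sets := pvTrueSets nr1_r2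
  let n := true_sets.length
  let st := (List.range n).foldl (fun (st : Int × List Int) setp_idx =>
      let unq_set := (List.range n).foldl (fun u setc_idx =>
          if setp_idx ≠ setc_idx then PySem.Set.diff u (true_sets.getD setc_idx []) else u)
        (true_sets.getD setp_idx [])
      let ubx : Int := (unq_set.length : Int)
      (st.1 + ubx, st.2 ++ [ubx])) ((0 : Int), ([] : List Int))
  st.1 :: st.2

-- ===== PORT B =====
def make_sure_r1_and_r2_agree_alt (nr1_r2 : List (List Int × List Int)) : List Int :=
  let true_sets := pvTrueSets nr1_r2
  -- counts[x] = counts.get(x, 0) + 1 over every element of every set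
  let counts : PySem.Dict Int Int :=
    true_sets.foldl (fun d s => s.foldl (fun d x => d.modify x 0 (· + 1)) d) PySem.Dict.empty
  let st := true_sets.foldl (fun (st : Int × List Int) s =>
      let ubx : Int := ((s.countP (fun x => counts.getD x 0 == 1)) : Int)
      (st.1 + ubx, st.2 ++ [ubx])) ((0 : Int), ([] : List Int))
  st.1 :: st.2

-- ===== PRECONDITION & SPEC =====
def Spec_make_sure_r1_and_r2_agree (nr1_r2 : List (List Int × List Int)) (out : List Int) : Prop := out = make_sure_r1_and_r2_agree_alt nr1_r2
instance (nr1_r2 : List (List Int × List Int)) (out : List Int) : Decidable (Spec_make_sure_r1_and_r2_agree nr1_r2 out) := by unfold Spec_make_sure_r1_and_r2_agree; infer_instance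

-- ===== CLAIM (what is proved, stated in full; the proofs are below) =====
def Claim_equal_make_sure_r1_and_r2_agree : Prop := ∀ (nr1_r2 : List (List Int × List Int)), Dom_make_sure_r1_and_r2_agree nr1_r2 → Spec_make_sure_r1_and_r2_agree nr1_r2 (make_sure_r1_and_r2_agree nr1_r2)

-- ===== LEMMAS AND PROOFS =====

-- the nested dict-building loop computes occurrence counts over the concatenation
lemma getD_counts_foldl (ts : List (List Int)) (d : PySem.Dict Int Int) (v : Int) :
    (ts.foldl (fun d s => s.foldl (fun d x => d.modify x 0 (· + 1)) d) d).getD v 0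
      = d.getD v 0 + (ts.flatMap id).count v := by
  induction ts generalizing d with
  | nil => simp
  | cons s t ih =>
      simp only [List.foldl_cons, List.flatMap_cons, List.count_append, ih,
        PySem.Dict.getD_foldl_modify_add_one, id]
      push_cast
      ring

-- the chain of difference_updates keeps exactly the elements in no other set
lemma foldl_diff_spec (p : Nat) (g : Nat → List Int) (cs : List Nat) (s : List Int)
    (hs : s.Nodup) :
    (cs.foldl (fun u c => if p ≠ c then PySem.Set.diff u (g c) else u) s).Nodup ∧
    (∀ x, x ∈ cs.foldl (fun u c => if p ≠ c then PySem.Set.diff u (g c) else u) s ↔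
      x ∈ s ∧ ∀ c ∈ cs, c ≠ p → x ∉ g c) := by
  induction cs generalizing s with
  | nil => simp [hs]
  | cons c t ih =>
      by_cases hpc : p ≠ c
      · have h := ih (PySem.Set.diff s (g c)) (PySem.Set.nodup_diff _ _ hs)
        refine ⟨by simpa [hpc] using h.1, fun x => ?_⟩
        rw [List.foldl_cons, if_pos hpc, h.2, PySem.Set.mem_diff]
        constructor
        · rintro ⟨⟨hx, hng⟩, hall⟩
          exact ⟨hx, fun c' hc' hne => by rcases List.mem_cons.mp hc' with rfl | hc' <;> [exact hng; exact hall c' hc' hne]⟩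
        · rintro ⟨hx, hall⟩
          exact ⟨⟨hx, hall c (List.mem_cons_self ..) (fun h => hpc h.symm)⟩,
            fun c' hc' hne => hall c' (List.mem_cons_of_mem _ hc') hne⟩
      · rw [not_not] at hpc
        subst hpc
        have h := ih s hs
        refine ⟨by simpa using h.1, fun x => ?_⟩
        rw [List.foldl_cons, if_neg (by omega), h.2]
        constructor
        · rintro ⟨hx, hall⟩
          exact ⟨hx, fun c' hc' hne => by rcases List.mem_cons.mp hc' with rfl | hc' <;> [exact absurd rfl hne; exact hall c' hc' hne]⟩
        · rintro ⟨hx, hall⟩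
          exact ⟨hx, fun c' hc' hne => hall c' (List.mem_cons_of_mem _ hc') hne⟩

-- an element of ts[p] has global count 1 iff it is in no other set
lemma count_flat_eq_one_iff (ts : List (List Int)) (hN : ∀ s ∈ ts, s.Nodup)
    (p : Nat) (hp : p < ts.length) (x : Int) (hx : x ∈ ts[p]) :
    ((ts.flatMap id).count x = 1) ↔ ∀ c, (hc : c < ts.length) → c ≠ p → x ∉ ts[c] := by
  induction ts generalizing p with
  | nil => simp at hp
  | cons s t ih =>
      have hsnd : s.Nodup := hN s (List.mem_cons_self ..)
      have hNt : ∀ u ∈ t, u.Nodup := fun u hu => hN u (List.mem_cons_of_mem _ hu)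
      rw [List.flatMap_cons, List.count_append, id]
      cases p with
      | zero =>
          simp only [List.getElem_cons_zero] at hx
          have h1 : s.count x = 1 := List.count_eq_one_of_mem hsnd hx
          have h0 : ((t.flatMap id).count x = 0) ↔ ∀ u ∈ t, x ∉ u := by
            rw [List.count_eq_zero]
            simp
          rw [h1]
          constructor
          · intro h c hc hc0
            match c, hc, hc0 with
            | c + 1, hc, _ =>
              have hct : c < t.length := by simpa using hc
              simp only [List.getElem_cons_succ]
              exact fun hmem => (h0.mp (by omega)) _ (List.getElem_mem hct) hmem
          · intro h
            have ht0 : (t.flatMap id).count x = 0 := by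
              rw [h0]
              intro u hu hxu
              obtain ⟨c, hct, rfl⟩ := List.getElem_of_mem hu
              exact h (c + 1) (by simpa using Nat.succ_lt_succ hct) (by omega)
                (by simpa using hxu)
            omega
      | succ p' =>
          simp only [List.getElem_cons_succ] at hx
          have hp' : p' < t.length := by simpa using hp
          have hpos : 0 < (t.flatMap id).count x :=
            List.count_pos_iff.mpr (List.mem_flatMap.mpr ⟨t[p'], List.getElem_mem hp', hx⟩)
          have iht := ih hNt p' hp' hx
          constructor
          · intro h c hc hcp
            have hs0 : s.count x = 0 := by omega
            match c, hc, hcp with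
            | 0, _, _ =>
              simpa [List.count_eq_zero] using hs0
            | c + 1, hc, hcp =>
              have hct : c < t.length := by simpa using hc
              simp only [List.getElem_cons_succ]
              exact (iht.mp (by omega)) c hct (by omega)
          · intro h
            have hxns : x ∉ s := h 0 (by omega) (by omega)
            have hs0 : s.count x = 0 := List.count_eq_zero.mpr hxns
            have ht1 : (t.flatMap id).count x = 1 := by
              rw [iht]
              intro c hc hcp
              have := h (c + 1) (by simpa using Nat.succ_lt_succ hc) (by omega)
              simpa using this
            omega

-- per-index equality of the appended value
lemma ubx_eq (ts : List (List Int)) (hN : ∀ s ∈ ts, s.Nodup) (p : Nat) (hp : p < ts.length) :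
    (((List.range ts.length).foldl (fun u c =>
        if p ≠ c then PySem.Set.diff u (ts.getD c []) else u) (ts.getD p [])).length : Int)
      = (((ts.getD p []).countP
          (fun x => (ts.foldl (fun d s => s.foldl (fun d x => d.modify x 0 (· + 1)) d)
            (PySem.Dict.empty : PySem.Dict Int Int)).getD x 0 == 1)) : Int) := by
  have hgetD : ts.getD p [] = ts[p] := List.getD_eq_getElem ts [] hp
  have hnd : (ts.getD p []).Nodup := by rw [hgetD]; exact hN _ (List.getElem_mem _)
  have hchain := foldl_diff_spec p (fun c => ts.getD c []) (List.range ts.length) (ts.getD p []) hnd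
  have hfil : ((ts.getD p []).countP
      (fun x => (ts.foldl (fun d s => s.foldl (fun d x => d.modify x 0 (· + 1)) d)
        (PySem.Dict.empty : PySem.Dict Int Int)).getD x 0 == 1))
      = ((ts.getD p []).filter
      (fun x => (ts.foldl (fun d s => s.foldl (fun d x => d.modify x 0 (· + 1)) d)
        (PySem.Dict.empty : PySem.Dict Int Int)).getD x 0 == 1)).length := List.countP_eq_length_filter
  rw [hfil]
  congr 1
  apply List.Perm.length_eq
  apply (List.perm_ext_iff_of_nodup hchain.1 (List.Nodup.filter _ hnd)).mpr
  intro x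
  rw [hchain.2, List.mem_filter]
  constructor
  · rintro ⟨hx, hall⟩
    refine ⟨hx, ?_⟩
    simp only [getD_counts_foldl, PySem.Dict.getD_empty, zero_add, beq_iff_eq]
    have : (ts.flatMap id).count x = 1 := by
      rw [count_flat_eq_one_iff ts hN p hp x (hgetD ▸ hx)]
      intro c hc hcp hmem
      exact hall c (List.mem_range.mpr hc) hcp (by show x ∈ ts.getD c []; rw [List.getD_eq_getElem ts [] hc]; exact hmem)
    exact_mod_cast this
  · rintro ⟨hx, hcnt⟩
    refine ⟨hx, ?_⟩
    simp only [getD_counts_foldl, PySem.Dict.getD_empty, zero_add, beq_iff_eq] at hcnt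
    have h1 : (ts.flatMap id).count x = 1 := by exact_mod_cast hcnt
    intro c hc hcp
    have := (count_flat_eq_one_iff ts hN p hp x (hgetD ▸ hx)).mp h1 c (List.mem_range.mp hc) hcp
    show x ∉ ts.getD c []
    rw [List.getD_eq_getElem ts [] (List.mem_range.mp hc)]
    exact this

-- the two folds compute the same (slot0, appended-list) state
lemma fold_eq (ts : List (List Int)) (hN : ∀ s ∈ ts, s.Nodup) :
    (List.range ts.length).foldl (fun (st : Int × List Int) p =>
        let unq := (List.range ts.length).foldl (fun u c =>
            if p ≠ c then PySem.Set.diff u (ts.getD c []) else u) (ts.getD p [])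
        let ubx : Int := (unq.length : Int)
        (st.1 + ubx, st.2 ++ [ubx])) ((0 : Int), ([] : List Int))
      = ts.foldl (fun (st : Int × List Int) s =>
        let ubx : Int := ((s.countP (fun x =>
          (ts.foldl (fun d s => s.foldl (fun d x => d.modify x 0 (· + 1)) d)
            (PySem.Dict.empty : PySem.Dict Int Int)).getD x 0 == 1)) : Int)
        (st.1 + ubx, st.2 ++ [ubx])) ((0 : Int), ([] : List Int)) := by
  set cnts := ts.foldl (fun d s => s.foldl (fun d x => d.modify x 0 (· + 1)) d)
    (PySem.Dict.empty : PySem.Dict Int Int) with hcnts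
  have hmap : ts = (List.range ts.length).map (fun p => ts.getD p []) := by
    apply List.ext_getElem (by simp)
    intro i h1 h2
    simp only [List.getElem_map, List.getElem_range]
    exact (List.getD_eq_getElem ts [] h1).symm
  conv_rhs => rw [hmap, List.foldl_map]
  apply PySem.List.foldl_congr_mem'
  intro p hp st
  have hub := ubx_eq ts hN p (List.mem_range.mp hp)
  rw [← hcnts] at hub
  simp only [hub]

-- ===== VERDICT (by name: the statement is the Claim_ definition above) =====
theorem make_sure_r1_and_r2_agree_spec : Claim_equal_make_sure_r1_and_r2_agree := by
  intro nr1_r2 _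
  unfold Spec_make_sure_r1_and_r2_agree make_sure_r1_and_r2_agree make_sure_r1_and_r2_agree_alt
  have hN : ∀ s ∈ pvTrueSets nr1_r2, s.Nodup := by
    intro s hs
    obtain ⟨pr, _, rfl⟩ := List.mem_map.mp hs
    exact PySem.Set.nodup_inter _ _ (PySem.Set.nodup_ofList _)
  simp only [fold_eq (pvTrueSets nr1_r2) hN]
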